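-- pv_equiv track=rewrite | github.com/YMGB96/SchoolProject-StrategyGames | board_blitz/ai.py | highest_player_stone
-- ===== SOURCE A (Python) =====
-- def highest_player_stone(checkers_board, player_num):
--     highest_row = -1
--     highest_col = -1
--     for row in range(len(checkers_board)):
--         for col in range(len(checkers_board[row])):
--             if checkers_board[row][col] == player_num:
--                 if row > highest_row:
--                     highest_row = row
--                     highest_col = col
--     if highest_row == -1 and highest_col == -1:
--         return None
--     else:
--         return (highest_row, highest_col)
-- ===== SOURCE B (Python) =====
-- def highest_player_stone(checkers_board, player_num):
--     for row in reversed(range(len(checkers_board))):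
--         cells = checkers_board[row]
--         if player_num in cells:
--             return (row, cells.index(player_num))
--     return None
-- ===== Notes on version B (the rewrite author's own statement) =====
-- stated objective: alternative
-- what changed: Replaces A's full scan of every cell with running-max bookkeeping by an early-exiting bottom-up search: the first row (from the end) containing the player is returned with the first matching column via list membership and .index.
import Mathlib
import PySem

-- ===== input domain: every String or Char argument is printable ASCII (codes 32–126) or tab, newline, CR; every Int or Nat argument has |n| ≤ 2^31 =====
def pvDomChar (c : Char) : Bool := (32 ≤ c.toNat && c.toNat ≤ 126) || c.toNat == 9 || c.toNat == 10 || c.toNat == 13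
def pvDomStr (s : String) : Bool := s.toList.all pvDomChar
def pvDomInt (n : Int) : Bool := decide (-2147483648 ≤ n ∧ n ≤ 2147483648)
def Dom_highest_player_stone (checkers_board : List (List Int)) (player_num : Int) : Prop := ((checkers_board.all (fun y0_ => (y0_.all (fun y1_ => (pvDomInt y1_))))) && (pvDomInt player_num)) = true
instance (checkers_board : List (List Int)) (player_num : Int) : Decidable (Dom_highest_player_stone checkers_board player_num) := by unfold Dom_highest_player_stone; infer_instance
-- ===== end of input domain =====

-- B scans rows bottom-up and returns at the first row containing the player (first matching
-- column), instead of A's full scan with running-max bookkeeping; return values are identical.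

-- ===== PORT A =====
-- full scan: for each row, for each col, update (highest_row, highest_col) when a higher row matches
def highest_player_stone (checkers_board : List (List Int)) (player_num : Int) : Option (Int × Int) :=
  let st := (PySem.List.enumerate checkers_board 0).foldl
    (fun st rc =>
      (PySem.List.enumerate rc.2 0).foldl
        (fun st cc =>
          if cc.2 = player_num then
            if rc.1 > st.1 then (rc.1, cc.1) else st
          else st) st)
    (-1, -1)
  if st.1 = -1 ∧ st.2 = -1 then none else some st

-- ===== PORT B =====
-- scan the enumerated rows in reverse; first row containing the player wins
def pvAltGo (player_num : Int) : List (Int × List Int) → Option (Int × Int)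
  | [] => none
  | (r, cells) :: rest =>
      if player_num ∈ cells then
        some (r, ((PySem.List.index? cells player_num).getD 0 : Nat))
      else pvAltGo player_num rest

def highest_player_stone_alt (checkers_board : List (List Int)) (player_num : Int) : Option (Int × Int) :=
  pvAltGo player_num (PySem.List.enumerate checkers_board 0).reverse

-- ===== PRECONDITION & SPEC =====
def Spec_highest_player_stone (checkers_board : List (List Int)) (player_num : Int) (out : Option (Int × Int)) : Prop := out = highest_player_stone_alt checkers_board player_num
instance (checkers_board : List (List Int)) (player_num : Int) (out : Option (Int × Int)) : Decidable (Spec_highest_player_stone checkers_board player_num out) := by unfold Spec_highest_player_stone; infer_instance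

-- ===== CLAIM (what is proved, stated in full; the proofs are below) =====
def Claim_equal_highest_player_stone : Prop := ∀ (checkers_board : List (List Int)) (player_num : Int), Dom_highest_player_stone checkers_board player_num → Spec_highest_player_stone checkers_board player_num (highest_player_stone checkers_board player_num)

-- ===== LEMMAS AND PROOFS =====

-- once the state's row equals r, the inner fold no longer changes it
theorem pv_inner_stuck (p r : Int) (cs : List (Int × Int)) (st : Int × Int) (h : ¬ r > st.1) :
    cs.foldl (fun st cc => if cc.2 = p then (if r > st.1 then (r, cc.1) else st) else st) st = st := by
  induction cs with
  | nil => rfl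
  | cons c cs ih =>
      simp only [List.foldl_cons]
      have hd : (if c.2 = p then (if r > st.1 then (r, c.1) else st) else st) = st := by
        by_cases hb : c.2 = p <;> simp [hb, h]
      rw [hd]; exact ih

-- the inner fold over one row either records (r, first matching column) or leaves the state
theorem pv_inner (p r : Int) (cells : List Int) (s : Int) (st : Int × Int) (h : st.1 < r) :
    (PySem.List.enumerate cells s).foldl
      (fun st cc => if cc.2 = p then (if r > st.1 then (r, cc.1) else st) else st) st
    = if p ∈ cells then (r, s + ((PySem.List.index? cells p).getD 0 : Nat)) else st := by
  induction cells generalizing s st with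
  | nil => simp [PySem.List.enumerate_nil]
  | cons c cells ih =>
      rw [PySem.List.enumerate_cons]
      simp only [List.foldl_cons]
      by_cases hc : c = p
      · subst hc
        have : (if c = c then (if r > st.1 then (r, s) else st) else st) = (r, s) := by
          simp [h]
        rw [this, pv_inner_stuck c r _ _ (by simp), PySem.List.index?_cons_self]
        simp
      · simp only [hc, if_false]
        rw [ih (s + 1) st h, PySem.List.index?_cons_of_ne cells hc]
        by_cases hm : p ∈ cells
        · rcases Option.isSome_iff_exists.1 ((PySem.List.index?_isSome_iff cells p).2 hm) with ⟨k, hk⟩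
          rw [PySem.List.index?_eq_idxOf?] at hk
          simp [hm, hk]
          ring
        · simp [hm]
          exact fun hpc => absurd hpc.symm hc

-- pvAltGo over an appended singleton: left result wins
theorem pv_altGo_append (p : Int) (xs ys : List (Int × List Int)) :
    pvAltGo p (xs ++ ys) = (pvAltGo p xs).or (pvAltGo p ys) := by
  induction xs with
  | nil => simp [pvAltGo]
  | cons x xs ih =>
      rcases x with ⟨r, cells⟩
      by_cases h : p ∈ cells <;> simp [pvAltGo, h, ih]

-- the outer fold equals the reverse early-exit scan
theorem pv_outer (p : Int) (rows : List (Int × List Int)) (st : Int × Int)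
    (hmono : ∀ x ∈ rows, st.1 < x.1)
    (hpair : rows.Pairwise (fun a b => a.1 < b.1)) :
    rows.foldl
      (fun st rc =>
        (PySem.List.enumerate rc.2 0).foldl
          (fun st cc => if cc.2 = p then (if rc.1 > st.1 then (rc.1, cc.1) else st) else st) st) st
    = (pvAltGo p rows.reverse).getD st := by
  induction rows generalizing st with
  | nil => simp [pvAltGo]
  | cons x rows ih =>
      rcases x with ⟨r, cells⟩
      have hpair' := (List.pairwise_cons.1 hpair)
      simp only [List.foldl_cons, List.reverse_cons, pv_altGo_append]
      rw [pv_inner p r cells 0 st (hmono _ (List.mem_cons_self))]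
      by_cases hm : p ∈ cells
      · simp only [hm, if_true]
        rw [ih _ (fun x hx => hpair'.1 x hx) hpair'.2]
        cases hgo : pvAltGo p rows.reverse with
        | none => simp [pvAltGo, hm]
        | some v => simp
      · simp only [hm, if_false]
        rw [ih st (fun x hx => hmono x (List.mem_cons_of_mem _ hx)) hpair'.2]
        simp [pvAltGo, hm]

theorem pv_altGo_nonneg (p : Int) (rows : List (Int × List Int)) (v : Int × Int)
    (h : ∀ x ∈ rows, 0 ≤ x.1) (he : pvAltGo p rows = some v) : 0 ≤ v.1 := by
  induction rows with
  | nil => simp [pvAltGo] at he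
  | cons x rows ih =>
      rcases x with ⟨r, cells⟩
      by_cases hm : p ∈ cells
      · simp [pvAltGo, hm] at he
        rcases he with rfl
        simpa using h (r, cells) List.mem_cons_self
      · simp [pvAltGo, hm] at he
        exact ih (fun x hx => h x (List.mem_cons_of_mem _ hx)) he

-- ===== VERDICT (by name: the statement is the Claim_ definition above) =====
theorem highest_player_stone_spec : Claim_equal_highest_player_stone := by
  intro board p _
  unfold Spec_highest_player_stone highest_player_stone highest_player_stone_alt
  have hmono : ∀ x ∈ PySem.List.enumerate board 0, (-1 : Int) < x.1 := by
    intro x hx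
    rcases (PySem.List.mem_enumerate_iff _ _ _).1 hx with ⟨k, hk, rfl⟩
    simp; omega
  have hout := pv_outer p (PySem.List.enumerate board 0) (-1, -1) hmono
    (PySem.List.pairwise_lt_enumerate board 0)
  simp only [hout]
  cases hgo : pvAltGo p (PySem.List.enumerate board 0).reverse with
  | none => simp
  | some v =>
      have hv : 0 ≤ v.1 := by
        refine pv_altGo_nonneg p _ v ?_ hgo
        intro x hx
        rcases (PySem.List.mem_enumerate_iff _ _ _).1 (List.mem_reverse.1 hx) with ⟨k, hk, rfl⟩
        simp
      have : ¬ (v.1 = -1 ∧ v.2 = -1) := by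
        rintro ⟨h1, _⟩; omega
      simp [this]
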